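-- pv_equiv track=rewrite | github.com/minivess-mlops/minivess-mlops | src/minivess/pipeline/trainer.py | _normalize_metric_name
-- ===== SOURCE A (Python) =====
-- def _normalize_metric_name(name: str) -> str:
--     """Normalize underscore-format metric names to slash-prefix format.
--
--     Config files use underscore (``val_loss``, ``train_dice``) for YAML
--     compatibility, but the trainer's ``all_metrics`` dict uses slash-prefix
--     format (``val/loss``, ``train/dice``) per the #790 migration.
--
--     Handles known prefixes: ``val_``, ``train_``, ``eval_``, ``prof_``,
--     ``gpu_``, ``optim_``. Names already containing ``/`` are returned as-is.
--     """
--     if "/" in name: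
--         return name
--     _PREFIXES = ("val_", "train_", "eval_", "prof_", "gpu_", "optim_")
--     for prefix in _PREFIXES:
--         if name.startswith(prefix):
--             phase = prefix.rstrip("_")
--             remainder = name[len(prefix) :]
--             return f"{phase}/{remainder}"
--     return name
-- ===== SOURCE B (Python) =====
-- def _normalize_metric_name(name: str) -> str:
--     """Normalize underscore-format metric names to slash-prefix format.
--
--     Instead of scanning six prefix strings, split the name once at its first
--     underscore and check the derived phase against a set of known phases.
--     """
--     if "/" in name:
--         return name
--     phase, sep, rest = name.partition("_")
--     if sep and phase in {"val", "train", "eval", "prof", "gpu", "optim"}: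
--         return f"{phase}/{rest}"
--     return name
-- ===== Notes on version B (the rewrite author's own statement) =====
-- stated objective: idiomatic
-- what changed: Replaces the linear scan over six prefix strings with startswith/rstrip/slicing by a single partition at the first underscore followed by one set-membership test on the derived phase.
import Mathlib
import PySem

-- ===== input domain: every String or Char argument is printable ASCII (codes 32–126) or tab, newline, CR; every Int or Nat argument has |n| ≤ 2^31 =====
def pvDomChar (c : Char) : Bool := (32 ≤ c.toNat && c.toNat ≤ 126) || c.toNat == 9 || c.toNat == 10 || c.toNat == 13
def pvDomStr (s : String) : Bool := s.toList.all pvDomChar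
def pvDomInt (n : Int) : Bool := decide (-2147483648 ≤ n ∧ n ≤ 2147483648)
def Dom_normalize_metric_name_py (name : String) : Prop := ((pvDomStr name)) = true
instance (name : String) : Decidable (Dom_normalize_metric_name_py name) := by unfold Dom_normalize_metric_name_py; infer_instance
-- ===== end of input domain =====

-- B replaces A's scan over six prefix strings by one partition at the first underscore
-- plus a set-membership test on the derived phase (idiomatic; same return value everywhere).

-- ===== PORT A =====
def pvPrefixesA : List (List Char) :=
  ["val_".toList, "train_".toList, "eval_".toList, "prof_".toList, "gpu_".toList, "optim_".toList]

-- hand port of prefix.rstrip("_") (single strip-char): drop trailing '_' characters; exact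
def pvRstripUnderscore (s : List Char) : List Char := (s.reverse.dropWhile (· == '_')).reverse

def pvLoopA (name : List Char) : List (List Char) → List Char
  | [] => name
  | p :: ps =>
    if PySem.Chars.startswith name p then
      pvRstripUnderscore p ++ '/' :: PySem.Chars.slice name (some (p.length : Int)) none
    else pvLoopA name ps

def normalize_metric_name_py (name : String) : String :=
  if PySem.Str.isIn "/" name then name
  else String.ofList (pvLoopA name.toList pvPrefixesA)

-- ===== PORT B =====
def pvPhases : List (List Char) :=
  PySem.Set.ofList ["val".toList, "train".toList, "eval".toList, "prof".toList, "gpu".toList, "optim".toList]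

-- hand port of name.partition("_") (single-char separator): split at the first occurrence; exact
def pvPartitionUnderscore (s : List Char) : List Char × List Char × List Char :=
  let i := PySem.Chars.find s ['_']
  if i = -1 then (s, [], [])
  else (s.take i.toNat, ['_'], s.drop (i.toNat + 1))

def normalize_metric_name_py_alt (name : String) : String :=
  if PySem.Str.isIn "/" name then name
  else
    let p := pvPartitionUnderscore name.toList
    if p.2.1 ≠ [] ∧ p.1 ∈ pvPhases then String.ofList (p.1 ++ '/' :: p.2.2)
    else name

-- ===== PRECONDITION & SPEC =====
def Spec_normalize_metric_name_py (name : String) (out : String) : Prop := out = normalize_metric_name_py_alt name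
instance (name : String) (out : String) : Decidable (Spec_normalize_metric_name_py name out) := by unfold Spec_normalize_metric_name_py; infer_instance

-- ===== CLAIM (what is proved, stated in full; the proofs are below) =====
def Claim_equal_normalize_metric_name_py : Prop := ∀ (name : String), Dom_normalize_metric_name_py name → Spec_normalize_metric_name_py name (normalize_metric_name_py name)

-- ===== LEMMAS AND PROOFS =====

-- a string containing an underscore splits as pre ++ '_' :: rest with no '_' in pre
lemma pv_split_first (l : List Char) (h : '_' ∈ l) :
    ∃ pre rest, l = pre ++ '_' :: rest ∧ '_' ∉ pre := by
  induction l with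
  | nil => cases h
  | cons c t ih =>
    by_cases hc : c = '_'
    · exact ⟨[], t, by simp [hc], by simp⟩
    · have ht : '_' ∈ t := by
        rcases List.mem_cons.mp h with h1 | h1
        · exact absurd h1.symm hc
        · exact h1
      obtain ⟨pre, rest, hrw, hpre⟩ := ih ht
      refine ⟨c :: pre, rest, by simp [hrw], ?_⟩
      intro hmem
      rcases List.mem_cons.mp hmem with e | e
      · exact hc e.symm
      · exact hpre e

-- a known prefix phase++"_" prefixes pre++"_"++rest (no '_' in phase, pre) exactly when phase = pre
lemma pv_prefix_key (phase : List Char) : ∀ (pre rest : List Char), '_' ∉ phase → '_' ∉ pre →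
    (phase ++ ['_']) <+: (pre ++ '_' :: rest) → phase = pre := by
  induction phase with
  | nil =>
    intro pre rest _ hpre h
    cases pre with
    | nil => rfl
    | cons b pre' =>
      simp only [List.nil_append, List.cons_append, List.cons_prefix_cons] at h
      exact absurd h.1.symm (fun e => hpre (by simp [e]))
  | cons a phase' ih =>
    intro pre rest hph hpre h
    cases pre with
    | nil =>
      simp only [List.cons_append, List.nil_append, List.cons_prefix_cons] at h
      exact absurd h.1 (fun e => hph (by simp [e]))
    | cons b pre' =>
      simp only [List.cons_append, List.cons_prefix_cons] at h
      have := ih pre' rest (fun e => hph (by simp [e])) (fun e => hpre (by simp [e])) h.2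
      simp [h.1, this]

-- singleton infix is membership
lemma pv_infix_singleton (c : Char) (l : List Char) : [c] <:+: l ↔ c ∈ l := by
  constructor
  · intro h
    exact h.sublist.subset (by simp)
  · intro h
    obtain ⟨s, t, rfl⟩ := List.append_of_mem h
    exact ⟨s, t, by simp⟩

lemma pv_find_none (l : List Char) (h : '_' ∉ l) : PySem.Chars.find l ['_'] = -1 := by
  rw [PySem.Chars.find_eq_neg_one_iff, pv_infix_singleton]
  exact h

lemma pv_find_first (pre rest : List Char) (hpre : '_' ∉ pre) :
    PySem.Chars.find (pre ++ '_' :: rest) ['_'] = (pre.length : Int) := by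
  have hnn : 0 ≤ PySem.Chars.find (pre ++ '_' :: rest) ['_'] := by
    rw [PySem.Chars.find_nonneg_iff, pv_infix_singleton]; simp
  obtain ⟨hpref, hmin⟩ := PySem.Chars.find_spec hnn
  set n := (PySem.Chars.find (pre ++ '_' :: rest) ['_']).toNat with hn
  have hget : (pre ++ '_' :: rest)[n]? = some '_' := by
    obtain ⟨t, ht⟩ := hpref
    rw [← List.head?_drop, ← ht]
    rfl
  have hgoal : n = pre.length := by
    by_contra hne
    rcases Nat.lt_or_ge n pre.length with hlt | hge
    · rw [List.getElem?_append_left hlt] at hget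
      exact hpre (List.mem_of_getElem? hget)
    · have hgt : pre.length < n := by omega
      exact hmin pre.length hgt ⟨rest, by simp⟩
  have := Int.toNat_of_nonneg hnn
  omega

lemma pv_loop_false (l : List Char) (ps : List (List Char))
    (h : ∀ p ∈ ps, PySem.Chars.startswith l p = false) : pvLoopA l ps = l := by
  induction ps with
  | nil => rfl
  | cons p ps ih => simp [pvLoopA, h p (by simp), ih (fun q hq => h q (by simp [hq]))]

lemma pv_loop_split (l p : List Char) (ps1 ps2 : List (List Char))
    (h1 : ∀ q ∈ ps1, PySem.Chars.startswith l q = false)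
    (h2 : PySem.Chars.startswith l p = true) :
    pvLoopA l (ps1 ++ p :: ps2) =
      pvRstripUnderscore p ++ '/' :: PySem.Chars.slice l (some (p.length : Int)) none := by
  induction ps1 with
  | nil => simp [pvLoopA, h2]
  | cons q qs ih => simp [pvLoopA, h1 q (by simp), ih (fun r hr => h1 r (by simp [hr]))]

lemma pv_ne_match (phase pre rest : List Char) (hph : '_' ∉ phase) (hpre : '_' ∉ pre)
    (hne : phase ≠ pre) :
    PySem.Chars.startswith (pre ++ '_' :: rest) (phase ++ ['_']) = false := by
  by_contra hc
  exact hne (pv_prefix_key phase pre rest hph hpre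
    ((PySem.Chars.startswith_iff _ _).mp (by simpa using hc)))

lemma pv_self_match (pre rest : List Char) :
    PySem.Chars.startswith (pre ++ '_' :: rest) (pre ++ ['_']) = true :=
  (PySem.Chars.startswith_iff _ _).mpr ⟨rest, by simp⟩

lemma pv_tail (pre rest : List Char) :
    PySem.Chars.slice (pre ++ '_' :: rest) (some (((pre ++ ['_']).length : Nat) : Int)) none = rest := by
  have hs := PySem.List.slice_from (pre ++ '_' :: rest)
    (a := (((pre ++ ['_']).length : Nat) : Int)) (Int.natCast_nonneg _)
  rw [PySem.Chars.slice_eq_listSlice, hs, Int.toNat_natCast,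
    show pre ++ '_' :: rest = (pre ++ ['_']) ++ rest from by simp, List.drop_left]

-- the core list-level equivalence
lemma pv_core (l : List Char) :
    pvLoopA l pvPrefixesA =
      (if (pvPartitionUnderscore l).2.1 ≠ [] ∧ (pvPartitionUnderscore l).1 ∈ pvPhases
       then (pvPartitionUnderscore l).1 ++ '/' :: (pvPartitionUnderscore l).2.2 else l) := by
  by_cases h : '_' ∈ l
  · obtain ⟨pre, rest, rfl, hpre⟩ := pv_split_first l h
    have hfind := pv_find_first pre rest hpre
    have hpart : pvPartitionUnderscore (pre ++ '_' :: rest) = (pre, ['_'], rest) := by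
      have hT : (pre ++ '_' :: rest).take pre.length = pre := List.take_left
      have hD : (pre ++ '_' :: rest).drop (pre.length + 1) = rest := by
        rw [show pre ++ '_' :: rest = (pre ++ ['_']) ++ rest from by simp,
          show pre.length + 1 = (pre ++ ['_']).length from by simp, List.drop_left]
      simp only [pvPartitionUnderscore, hfind]
      have h1 : ¬ ((pre.length : Int) = -1) := by omega
      have h2 : ((pre.length : Int)).toNat = pre.length := by omega
      simp only [h1, if_false, h2, hT, hD]
    simp only [hpart]
    by_cases hm : pre ∈ pvPhases
    · rw [if_pos ⟨by simp, hm⟩]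
      have hm' : pre ∈ ["val".toList, "train".toList, "eval".toList, "prof".toList,
          "gpu".toList, "optim".toList] := by
        rw [pvPhases, PySem.Set.mem_ofList] at hm
        exact hm
      simp only [List.mem_cons, List.not_mem_nil, or_false] at hm'
      rcases hm' with rfl | rfl | rfl | rfl | rfl | rfl
      · rw [show pvPrefixesA = [] ++ ("val".toList ++ ['_']) ::
            ["train_".toList, "eval_".toList, "prof_".toList, "gpu_".toList, "optim_".toList]
            from rfl,
          pv_loop_split _ _ _ _ (fun q hq => absurd hq (List.not_mem_nil)) (pv_self_match _ _),
          show pvRstripUnderscore ("val".toList ++ ['_']) = "val".toList from by decide,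
          pv_tail]
      · rw [show pvPrefixesA = ["val_".toList] ++ ("train".toList ++ ['_']) ::
            ["eval_".toList, "prof_".toList, "gpu_".toList, "optim_".toList] from rfl,
          pv_loop_split _ _ _ _ ?_ (pv_self_match _ _),
          show pvRstripUnderscore ("train".toList ++ ['_']) = "train".toList from by decide,
          pv_tail]
        intro q hq
        rw [List.mem_singleton] at hq
        subst hq
        exact pv_ne_match "val".toList "train".toList rest (by decide) (by decide) (by decide)
      · rw [show pvPrefixesA = ["val_".toList, "train_".toList] ++ ("eval".toList ++ ['_']) ::
            ["prof_".toList, "gpu_".toList, "optim_".toList] from rfl,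
          pv_loop_split _ _ _ _ ?_ (pv_self_match _ _),
          show pvRstripUnderscore ("eval".toList ++ ['_']) = "eval".toList from by decide,
          pv_tail]
        intro q hq
        simp only [List.mem_cons, List.not_mem_nil, or_false] at hq
        rcases hq with rfl | rfl
        · exact pv_ne_match "val".toList "eval".toList rest (by decide) (by decide) (by decide)
        · exact pv_ne_match "train".toList "eval".toList rest (by decide) (by decide) (by decide)
      · rw [show pvPrefixesA = ["val_".toList, "train_".toList, "eval_".toList] ++
            ("prof".toList ++ ['_']) :: ["gpu_".toList, "optim_".toList] from rfl,
          pv_loop_split _ _ _ _ ?_ (pv_self_match _ _),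
          show pvRstripUnderscore ("prof".toList ++ ['_']) = "prof".toList from by decide,
          pv_tail]
        intro q hq
        simp only [List.mem_cons, List.not_mem_nil, or_false] at hq
        rcases hq with rfl | rfl | rfl
        · exact pv_ne_match "val".toList "prof".toList rest (by decide) (by decide) (by decide)
        · exact pv_ne_match "train".toList "prof".toList rest (by decide) (by decide) (by decide)
        · exact pv_ne_match "eval".toList "prof".toList rest (by decide) (by decide) (by decide)
      · rw [show pvPrefixesA = ["val_".toList, "train_".toList, "eval_".toList, "prof_".toList] ++
            ("gpu".toList ++ ['_']) :: ["optim_".toList] from rfl,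
          pv_loop_split _ _ _ _ ?_ (pv_self_match _ _),
          show pvRstripUnderscore ("gpu".toList ++ ['_']) = "gpu".toList from by decide,
          pv_tail]
        intro q hq
        simp only [List.mem_cons, List.not_mem_nil, or_false] at hq
        rcases hq with rfl | rfl | rfl | rfl
        · exact pv_ne_match "val".toList "gpu".toList rest (by decide) (by decide) (by decide)
        · exact pv_ne_match "train".toList "gpu".toList rest (by decide) (by decide) (by decide)
        · exact pv_ne_match "eval".toList "gpu".toList rest (by decide) (by decide) (by decide)
        · exact pv_ne_match "prof".toList "gpu".toList rest (by decide) (by decide) (by decide)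
      · rw [show pvPrefixesA = ["val_".toList, "train_".toList, "eval_".toList, "prof_".toList,
            "gpu_".toList] ++ ("optim".toList ++ ['_']) :: [] from rfl,
          pv_loop_split _ _ _ _ ?_ (pv_self_match _ _),
          show pvRstripUnderscore ("optim".toList ++ ['_']) = "optim".toList from by decide,
          pv_tail]
        intro q hq
        simp only [List.mem_cons, List.not_mem_nil, or_false] at hq
        rcases hq with rfl | rfl | rfl | rfl | rfl
        · exact pv_ne_match "val".toList "optim".toList rest (by decide) (by decide) (by decide)
        · exact pv_ne_match "train".toList "optim".toList rest (by decide) (by decide) (by decide)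
        · exact pv_ne_match "eval".toList "optim".toList rest (by decide) (by decide) (by decide)
        · exact pv_ne_match "prof".toList "optim".toList rest (by decide) (by decide) (by decide)
        · exact pv_ne_match "gpu".toList "optim".toList rest (by decide) (by decide) (by decide)
    · have hsw : ∀ p ∈ pvPrefixesA,
          PySem.Chars.startswith (pre ++ '_' :: rest) p = false := by
        intro p hp
        simp only [pvPrefixesA, List.mem_cons, List.not_mem_nil, or_false] at hp
        rcases hp with rfl | rfl | rfl | rfl | rfl | rfl
        · exact pv_ne_match "val".toList pre rest (by decide) hpre
            (fun e => hm (e ▸ (by decide : "val".toList ∈ pvPhases)))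
        · exact pv_ne_match "train".toList pre rest (by decide) hpre
            (fun e => hm (e ▸ (by decide : "train".toList ∈ pvPhases)))
        · exact pv_ne_match "eval".toList pre rest (by decide) hpre
            (fun e => hm (e ▸ (by decide : "eval".toList ∈ pvPhases)))
        · exact pv_ne_match "prof".toList pre rest (by decide) hpre
            (fun e => hm (e ▸ (by decide : "prof".toList ∈ pvPhases)))
        · exact pv_ne_match "gpu".toList pre rest (by decide) hpre
            (fun e => hm (e ▸ (by decide : "gpu".toList ∈ pvPhases)))
        · exact pv_ne_match "optim".toList pre rest (by decide) hpre
            (fun e => hm (e ▸ (by decide : "optim".toList ∈ pvPhases)))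
      rw [pv_loop_false _ _ hsw]
      simp [hm]
  · have hsw : ∀ p ∈ pvPrefixesA, PySem.Chars.startswith l p = false := by
      intro p hp
      by_contra hc
      have hpref : p <+: l := (PySem.Chars.startswith_iff _ _).mp (by simpa using hc)
      have hu : '_' ∈ p := by
        simp only [pvPrefixesA, List.mem_cons, List.not_mem_nil, or_false] at hp
        rcases hp with rfl | rfl | rfl | rfl | rfl | rfl <;> decide
      exact h (hpref.subset hu)
    rw [pv_loop_false _ _ hsw]
    simp [pvPartitionUnderscore, pv_find_none l h]

-- ===== VERDICT (by name: the statement is the Claim_ definition above) =====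
theorem normalize_metric_name_py_spec : Claim_equal_normalize_metric_name_py := by
  intro name _
  unfold Spec_normalize_metric_name_py normalize_metric_name_py normalize_metric_name_py_alt
  rw [pv_core]
  by_cases h : PySem.Str.isIn "/" name = true
  · rw [if_pos h, if_pos h]
  · rw [if_neg h, if_neg h]
    show String.ofList
        (if (pvPartitionUnderscore name.toList).2.1 ≠ [] ∧
            (pvPartitionUnderscore name.toList).1 ∈ pvPhases
         then (pvPartitionUnderscore name.toList).1 ++ '/' ::
            (pvPartitionUnderscore name.toList).2.2
         else name.toList) =
      (if (pvPartitionUnderscore name.toList).2.1 ≠ [] ∧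
          (pvPartitionUnderscore name.toList).1 ∈ pvPhases
       then String.ofList ((pvPartitionUnderscore name.toList).1 ++ '/' ::
          (pvPartitionUnderscore name.toList).2.2)
       else name)
    by_cases hc : (pvPartitionUnderscore name.toList).2.1 ≠ [] ∧
        (pvPartitionUnderscore name.toList).1 ∈ pvPhases
    · rw [if_pos hc, if_pos hc]
    · rw [if_neg hc, if_neg hc]
      exact String.ofList_toList
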